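-- pv_equiv track=rewrite | github.com/epilectrik/voynich | phases/BRUNSCHWIG_SEMANTIC_ANCHOR/phase3_material_incompatibility.py | decompose_token
-- ===== SOURCE A (Python) =====
-- KNOWN_PREFIXES = ['qo', 'ol', 'or', 'al', 'ar', 'ok', 'ot', 'ch', 'sh', 'ct', 'd', 's', 'y', 'o', 'a']
--
-- def decompose_token(token):
--     """Extract MIDDLE from token."""
--     if not token or len(token) < 2:
--         return ('', token, '')
--
--     prefix = ''
--     for p in sorted(KNOWN_PREFIXES, key=len, reverse=True):
--         if token.startswith(p):
--             prefix = p
--             token = token[len(p):]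
--             break
--
--     return (prefix, token, '')
-- ===== SOURCE B (Python) =====
-- KNOWN_PREFIXES = ['qo', 'ol', 'or', 'al', 'ar', 'ok', 'ot', 'ch', 'sh', 'ct', 'd', 's', 'y', 'o', 'a']
--
-- # Character trie over KNOWN_PREFIXES; the '' key marks the end of a known prefix.
-- # The token is walked character by character through the trie, remembering the
-- # deepest position where an end mark was seen (longest match).
-- _TRIE = {
--     'q': {'o': {'': True}},
--     'o': {'': True, 'l': {'': True}, 'r': {'': True}, 'k': {'': True}, 't': {'': True}},
--     'a': {'': True, 'l': {'': True}, 'r': {'': True}},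
--     'c': {'h': {'': True}, 't': {'': True}},
--     's': {'': True, 'h': {'': True}},
--     'd': {'': True},
--     'y': {'': True},
-- }
--
-- def decompose_token(token):
--     """Extract MIDDLE from token."""
--     if not token or len(token) < 2:
--         return ('', token, '')
--     node, best, i = _TRIE, 0, 0
--     while i < len(token) and token[i] in node:
--         node = node[token[i]]
--         i += 1
--         if '' in node:
--             best = i
--     return (token[:best], token[best:], '')
-- ===== Notes on version B (the rewrite author's own statement) =====
-- stated objective: alternative
-- what changed: A sorts the prefix list by length on every call and scans it testing token.startswith on each candidate; B walks the token character by character through a precomputed character trie, remembering the deepest end-of-prefix mark (longest match by automaton traversal, no candidate enumeration).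
import Mathlib
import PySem

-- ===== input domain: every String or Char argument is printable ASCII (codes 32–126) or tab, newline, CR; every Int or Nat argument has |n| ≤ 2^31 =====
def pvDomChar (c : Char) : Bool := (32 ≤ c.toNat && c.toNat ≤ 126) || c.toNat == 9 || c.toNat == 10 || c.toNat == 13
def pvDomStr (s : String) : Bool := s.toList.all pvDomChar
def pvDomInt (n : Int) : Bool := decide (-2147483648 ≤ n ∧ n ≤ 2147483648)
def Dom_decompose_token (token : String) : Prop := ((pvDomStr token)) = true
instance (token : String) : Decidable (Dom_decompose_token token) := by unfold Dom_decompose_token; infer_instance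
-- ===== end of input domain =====

-- B replaces A's sort-then-scan over candidate prefixes by a single character-by-character
-- walk of the token through a precomputed trie (deepest end mark = longest match);
-- objective: alternative.

-- ===== PORT A =====
def KNOWN_PREFIXES : List String :=
  ["qo", "ol", "or", "al", "ar", "ok", "ot", "ch", "sh", "ct", "d", "s", "y", "o", "a"]

-- the "for p in sorted(KNOWN_PREFIXES, key=len, reverse=True): if token.startswith(p): ...; break" loop
def decomposeLoopA : List String → String → String × String
  | [], tok => ("", tok)
  | p :: rest, tok =>
      if PySem.Str.startswith tok p then (p, PySem.Str.slice tok (some (PySem.Str.len p)) none)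
      else decomposeLoopA rest tok

def decompose_token (token : String) : String × String × String :=
  if token = "" ∨ PySem.Str.len token < 2 then ("", token, "")
  else
    let r := decomposeLoopA (PySem.List.sorted KNOWN_PREFIXES (fun p => PySem.Str.len p) true) token
    (r.1, r.2, "")

-- ===== PORT B =====
-- _TRIE holds nested dicts of mixed value type (dict or the '' end mark), so it is ported by
-- hand as an explicit trie structure: the Bool is the '' end-mark key, the child list the
-- character keys; lookup = first match, exact for these duplicate-free literal keys.
mutual
inductive Trie where
  | node : Bool → TrieKids → Trie
inductive TrieKids where
  | nil : TrieKids
  | cons : Char → Trie → TrieKids → TrieKids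
end

def TrieKids.find : TrieKids → Char → Option Trie
  | .nil, _ => none
  | .cons c t rest, d => if d = c then some t else rest.find d

def Trie.terminal : Trie → Bool | .node b _ => b
def Trie.kids : Trie → TrieKids | .node _ k => k

def tEnd : Trie := .node true .nil

def TRIE : Trie :=
  .node false (
    .cons 'q' (.node false (.cons 'o' tEnd .nil)) (
    .cons 'o' (.node true (.cons 'l' tEnd (.cons 'r' tEnd (.cons 'k' tEnd (.cons 't' tEnd .nil))))) (
    .cons 'a' (.node true (.cons 'l' tEnd (.cons 'r' tEnd .nil))) (
    .cons 'c' (.node false (.cons 'h' tEnd (.cons 't' tEnd .nil))) (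
    .cons 's' (.node true (.cons 'h' tEnd .nil)) (
    .cons 'd' tEnd (
    .cons 'y' tEnd .nil)))))))

-- the "while i < len(token) and token[i] in node:" loop, walking the remaining characters
def trieWalk : Trie → List Char → Int → Int → Int
  | _, [], _, best => best
  | node, c :: rest, i, best =>
      match node.kids.find c with
      | none => best
      | some child => trieWalk child rest (i + 1) (if child.terminal then i + 1 else best)

def decompose_token_alt (token : String) : String × String × String :=
  if token = "" ∨ PySem.Str.len token < 2 then ("", token, "")
  else
    let best := trieWalk TRIE token.toList 0 0
    (PySem.Str.slice token none (some best), PySem.Str.slice token (some best) none, "")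

-- ===== PRECONDITION & SPEC =====
def Spec_decompose_token (token : String) (out : String × String × String) : Prop := out = decompose_token_alt token
instance (token : String) (out : String × String × String) : Decidable (Spec_decompose_token token out) := by unfold Spec_decompose_token; infer_instance

-- ===== CLAIM (what is proved, stated in full; the proofs are below) =====
def Claim_equal_decompose_token : Prop := ∀ (token : String), Dom_decompose_token token → Spec_decompose_token token (decompose_token token)

-- ===== LEMMAS AND PROOFS =====

theorem sorted_known :
    PySem.List.sorted KNOWN_PREFIXES (fun p => PySem.Str.len p) true = KNOWN_PREFIXES := by
  decide

theorem walk_leaf (b : Bool) (t : List Char) (i best : Int) :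
    trieWalk (.node b .nil) t i best = best := by
  cases t <;> simp [trieWalk, Trie.kids, TrieKids.find]

set_option maxHeartbeats 4000000 in
theorem eq_core (a b : Char) (t : List Char) :
    decompose_token (String.ofList (a :: b :: t)) = decompose_token_alt (String.ofList (a :: b :: t)) := by
  have h0 : ¬((t.length:Int) < 0) := by omega
  have s2 : PySem.List.slice (a :: b :: t) none (some (2:Int)) = [a, b] := by
    rw [PySem.List.slice_to] <;> first | rfl | omega
  have s1 : PySem.List.slice (a :: b :: t) none (some (1:Int)) = [a] := by
    rw [PySem.List.slice_to] <;> first | rfl | omega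
  have s0 : PySem.List.slice (a :: b :: t) none (some (0:Int)) = [] := by
    rw [PySem.List.slice_to] <;> first | rfl | omega
  have f0 : PySem.List.slice (a :: b :: t) (some (0:Int)) none = a :: b :: t := by
    rw [PySem.List.slice_from] <;> first | rfl | omega
  have hq : ∀ (l : List Char) (s : String), (String.ofList l = s) ↔ l = s.toList := by
    intro l s; rw [← String.ofList_toList (s := s), String.ofList_inj, String.ofList_toList]
  simp only [decompose_token, decompose_token_alt, sorted_known]
  by_cases ha0 : a = 'q'
  · subst ha0
    by_cases hb0 : b = 'o'
    · subst hb0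
      simp [decomposeLoopA, KNOWN_PREFIXES, PySem.Str.startswith, PySem.Chars.startswith,
        PySem.Str.slice, trieWalk, TRIE, tEnd, Trie.kids, Trie.terminal, TrieKids.find,
        walk_leaf, h0, s2, s1, s0, f0, hq]
    simp [decomposeLoopA, KNOWN_PREFIXES, PySem.Str.startswith, PySem.Chars.startswith,
        PySem.Str.slice, trieWalk, TRIE, tEnd, Trie.kids, Trie.terminal, TrieKids.find,
        walk_leaf, h0, s2, s1, s0, f0, hq, hb0, (show ¬('o' = b) from fun h => hb0 h.symm)]
  by_cases ha1 : a = 'o'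
  · subst ha1
    by_cases hb0 : b = 'l'
    · subst hb0
      simp [decomposeLoopA, KNOWN_PREFIXES, PySem.Str.startswith, PySem.Chars.startswith,
        PySem.Str.slice, trieWalk, TRIE, tEnd, Trie.kids, Trie.terminal, TrieKids.find,
        walk_leaf, h0, s2, s1, s0, f0, hq]
    by_cases hb1 : b = 'r'
    · subst hb1
      simp [decomposeLoopA, KNOWN_PREFIXES, PySem.Str.startswith, PySem.Chars.startswith,
        PySem.Str.slice, trieWalk, TRIE, tEnd, Trie.kids, Trie.terminal, TrieKids.find,
        walk_leaf, h0, s2, s1, s0, f0, hq]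
    by_cases hb2 : b = 'k'
    · subst hb2
      simp [decomposeLoopA, KNOWN_PREFIXES, PySem.Str.startswith, PySem.Chars.startswith,
        PySem.Str.slice, trieWalk, TRIE, tEnd, Trie.kids, Trie.terminal, TrieKids.find,
        walk_leaf, h0, s2, s1, s0, f0, hq]
    by_cases hb3 : b = 't'
    · subst hb3
      simp [decomposeLoopA, KNOWN_PREFIXES, PySem.Str.startswith, PySem.Chars.startswith,
        PySem.Str.slice, trieWalk, TRIE, tEnd, Trie.kids, Trie.terminal, TrieKids.find,
        walk_leaf, h0, s2, s1, s0, f0, hq]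
    simp [decomposeLoopA, KNOWN_PREFIXES, PySem.Str.startswith, PySem.Chars.startswith,
        PySem.Str.slice, trieWalk, TRIE, tEnd, Trie.kids, Trie.terminal, TrieKids.find,
        walk_leaf, h0, s2, s1, s0, f0, hq, hb0, (show ¬('l' = b) from fun h => hb0 h.symm), hb1, (show ¬('r' = b) from fun h => hb1 h.symm), hb2, (show ¬('k' = b) from fun h => hb2 h.symm), hb3, (show ¬('t' = b) from fun h => hb3 h.symm)]
  by_cases ha2 : a = 'a'
  · subst ha2
    by_cases hb0 : b = 'l'
    · subst hb0
      simp [decomposeLoopA, KNOWN_PREFIXES, PySem.Str.startswith, PySem.Chars.startswith,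
        PySem.Str.slice, trieWalk, TRIE, tEnd, Trie.kids, Trie.terminal, TrieKids.find,
        walk_leaf, h0, s2, s1, s0, f0, hq]
    by_cases hb1 : b = 'r'
    · subst hb1
      simp [decomposeLoopA, KNOWN_PREFIXES, PySem.Str.startswith, PySem.Chars.startswith,
        PySem.Str.slice, trieWalk, TRIE, tEnd, Trie.kids, Trie.terminal, TrieKids.find,
        walk_leaf, h0, s2, s1, s0, f0, hq]
    simp [decomposeLoopA, KNOWN_PREFIXES, PySem.Str.startswith, PySem.Chars.startswith,
        PySem.Str.slice, trieWalk, TRIE, tEnd, Trie.kids, Trie.terminal, TrieKids.find,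
        walk_leaf, h0, s2, s1, s0, f0, hq, hb0, (show ¬('l' = b) from fun h => hb0 h.symm), hb1, (show ¬('r' = b) from fun h => hb1 h.symm)]
  by_cases ha3 : a = 'c'
  · subst ha3
    by_cases hb0 : b = 'h'
    · subst hb0
      simp [decomposeLoopA, KNOWN_PREFIXES, PySem.Str.startswith, PySem.Chars.startswith,
        PySem.Str.slice, trieWalk, TRIE, tEnd, Trie.kids, Trie.terminal, TrieKids.find,
        walk_leaf, h0, s2, s1, s0, f0, hq]
    by_cases hb1 : b = 't'
    · subst hb1
      simp [decomposeLoopA, KNOWN_PREFIXES, PySem.Str.startswith, PySem.Chars.startswith,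
        PySem.Str.slice, trieWalk, TRIE, tEnd, Trie.kids, Trie.terminal, TrieKids.find,
        walk_leaf, h0, s2, s1, s0, f0, hq]
    simp [decomposeLoopA, KNOWN_PREFIXES, PySem.Str.startswith, PySem.Chars.startswith,
        PySem.Str.slice, trieWalk, TRIE, tEnd, Trie.kids, Trie.terminal, TrieKids.find,
        walk_leaf, h0, s2, s1, s0, f0, hq, hb0, (show ¬('h' = b) from fun h => hb0 h.symm), hb1, (show ¬('t' = b) from fun h => hb1 h.symm)]
  by_cases ha4 : a = 's'
  · subst ha4
    by_cases hb0 : b = 'h'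
    · subst hb0
      simp [decomposeLoopA, KNOWN_PREFIXES, PySem.Str.startswith, PySem.Chars.startswith,
        PySem.Str.slice, trieWalk, TRIE, tEnd, Trie.kids, Trie.terminal, TrieKids.find,
        walk_leaf, h0, s2, s1, s0, f0, hq]
    simp [decomposeLoopA, KNOWN_PREFIXES, PySem.Str.startswith, PySem.Chars.startswith,
        PySem.Str.slice, trieWalk, TRIE, tEnd, Trie.kids, Trie.terminal, TrieKids.find,
        walk_leaf, h0, s2, s1, s0, f0, hq, hb0, (show ¬('h' = b) from fun h => hb0 h.symm)]
  by_cases ha5 : a = 'd'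
  · subst ha5
    simp [decomposeLoopA, KNOWN_PREFIXES, PySem.Str.startswith, PySem.Chars.startswith,
        PySem.Str.slice, trieWalk, TRIE, tEnd, Trie.kids, Trie.terminal, TrieKids.find,
        walk_leaf, h0, s2, s1, s0, f0, hq]
  by_cases ha6 : a = 'y'
  · subst ha6
    simp [decomposeLoopA, KNOWN_PREFIXES, PySem.Str.startswith, PySem.Chars.startswith,
        PySem.Str.slice, trieWalk, TRIE, tEnd, Trie.kids, Trie.terminal, TrieKids.find,
        walk_leaf, h0, s2, s1, s0, f0, hq]
  simp [decomposeLoopA, KNOWN_PREFIXES, PySem.Str.startswith, PySem.Chars.startswith,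
        PySem.Str.slice, trieWalk, TRIE, tEnd, Trie.kids, Trie.terminal, TrieKids.find,
        walk_leaf, h0, s2, s1, s0, f0, hq, (show ¬('q' = a) from fun h => ha0 (h.symm)), ha0, (show ¬('o' = a) from fun h => ha1 (h.symm)), ha1, (show ¬('a' = a) from fun h => ha2 (h.symm)), ha2, (show ¬('c' = a) from fun h => ha3 (h.symm)), ha3, (show ¬('s' = a) from fun h => ha4 (h.symm)), ha4, (show ¬('d' = a) from fun h => ha5 (h.symm)), ha5, (show ¬('y' = a) from fun h => ha6 (h.symm)), ha6]

-- ===== VERDICT (by name: the statement is the Claim_ definition above) =====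
theorem decompose_token_spec : Claim_equal_decompose_token := by
  intro token _
  unfold Spec_decompose_token
  rw [← String.ofList_toList (s := token)]
  generalize token.toList = l
  match l with
  | [] => simp [decompose_token, decompose_token_alt]
  | [c] => simp [decompose_token, decompose_token_alt, PySem.Str.len]
  | a :: b :: t => exact eq_core a b t
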